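-- pv_equiv track=rewrite | github.com/cecilyp/Twitter-analysis | HW03_CRPAGE.py | get_word_content
-- ===== SOURCE A (Python) =====
-- from string import punctuation
-- import collections
--
-- def get_word_content(tweet_list):
--     exclude = set(punctuation) # Keep a set of "bad" characters.
--
--     all_words = []
--     for tweet in tweet_list:
--         tweet_text = tweet['text'].lower()
--         tweet_text = [char for char in tweet_text if char not in exclude]
--         tweet_text = "".join(tweet_text)
--         [all_words.append(u_word) for u_word in tweet_text.split()]
--
--     return collections.Counter(all_words)
-- ===== SOURCE B (Python) =====
-- from string import punctuation
-- import collections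
--
-- def get_word_content(tweet_list):
--     bad = set(punctuation)
--     counts = {}
--     for tweet in tweet_list:
--         cur = []
--         for ch in tweet['text']:
--             ch = ch.lower()
--             if ch in bad:
--                 continue
--             if ch.isspace():
--                 if cur:
--                     word = ''.join(cur)
--                     counts[word] = counts.get(word, 0) + 1
--                     cur = []
--             else:
--                 cur.append(ch)
--         if cur:
--             word = ''.join(cur)
--             counts[word] = counts.get(word, 0) + 1
--     return collections.Counter(counts)
-- ===== Notes on version B (the rewrite author's own statement) =====
-- stated objective: alternative
-- what changed: A lowercases each tweet, builds a punctuation-free copy via a char comprehension plus join, splits it into a word list accumulated across tweets and hands that list to collections.Counter; B never materialises any intermediate string or word list: it runs a single character-level tokenizer pass (lowercase char, skip punctuation, whitespace ends the current word) that counts each word into a dict the moment it completes.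
import Mathlib
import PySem

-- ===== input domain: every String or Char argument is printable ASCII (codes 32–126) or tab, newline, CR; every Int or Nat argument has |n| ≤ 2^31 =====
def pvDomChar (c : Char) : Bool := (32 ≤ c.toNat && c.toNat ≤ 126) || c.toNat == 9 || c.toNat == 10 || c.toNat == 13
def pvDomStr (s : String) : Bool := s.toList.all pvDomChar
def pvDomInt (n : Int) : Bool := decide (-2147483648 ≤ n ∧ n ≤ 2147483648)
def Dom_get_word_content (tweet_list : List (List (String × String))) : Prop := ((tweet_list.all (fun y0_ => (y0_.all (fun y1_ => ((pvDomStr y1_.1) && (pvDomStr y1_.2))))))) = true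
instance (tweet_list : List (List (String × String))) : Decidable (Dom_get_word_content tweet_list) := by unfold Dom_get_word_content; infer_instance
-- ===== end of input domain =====

-- B replaces A's per-tweet build-string/join/split/Counter pipeline by a single character-level
-- tokenizer pass that counts each word into a dict as it completes (objective: alternative).

-- ===== PORT A =====
-- string.punctuation
def pvPunct : List Char := "!\"#$%&'()*+,-./:;<=>?@[\\]^_`{|}~".toList
-- set(punctuation), shared by both ports (both Pythons build it from string.punctuation)
def pvExclude : PySem.Set Char := PySem.Set.ofList pvPunct

def get_word_content (tweet_list : List (List (String × String))) : List (String × Int) :=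
  let exclude : PySem.Set Char := pvExclude
  -- 'tweet['text']' raises KeyError when the key is absent: excluded by Pre_; '.getD ""' is never
  -- reached on inputs satisfying Pre_get_word_content.
  let all_words : List String := tweet_list.foldl (fun all_words tweet =>
    let tweet_text := PySem.Str.lower (((PySem.Dict.mk tweet).get? "text").getD "")
    let chars := tweet_text.toList.filter (fun c => !(PySem.Set.contains exclude c))
    let tweet_text2 := String.ofList chars
    (PySem.Str.split₀ tweet_text2).foldl (fun a w => a ++ [w]) all_words) []
  (PySem.Dict.counter all_words).items

-- ===== PORT B =====
-- counts[word] = counts.get(word, 0) + 1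
def pvBump (d : PySem.Dict String Int) (w : String) : PySem.Dict String Int :=
  d.insert w (d.getD w 0 + 1)

-- the tokenizer's reaction to one (already lowered, non-punctuation) character
def pvStep (st : PySem.Dict String Int × List Char) (ch : Char) : PySem.Dict String Int × List Char :=
  if PySem.Chars.isspace ch then
    (if st.2.isEmpty then st else (pvBump st.1 (String.ofList st.2), ([] : List Char)))
  else (st.1, st.2 ++ [ch])

-- the end-of-tweet 'if cur: count the last word'
def pvFlush (st : PySem.Dict String Int × List Char) : PySem.Dict String Int :=
  if st.2.isEmpty then st.1 else pvBump st.1 (String.ofList st.2)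

def get_word_content_alt (tweet_list : List (List (String × String))) : List (String × Int) :=
  let bad : PySem.Set Char := pvExclude
  let counts : PySem.Dict String Int := tweet_list.foldl (fun counts tweet =>
    pvFlush ((((PySem.Dict.mk tweet).get? "text").getD "").toList.foldl
      (fun st ch0 =>
        let ch := PySem.Chars.lowerChar ch0
        if PySem.Set.contains bad ch then st else pvStep st ch)
      (counts, ([] : List Char)))) PySem.Dict.empty
  counts.items

-- ===== PRECONDITION & SPEC =====
-- Pre_ excludes exactly the inputs where some tweet lacks the 'text' key, on which Python A raises KeyError.
def Pre_get_word_content (tweet_list : List (List (String × String))) : Prop :=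
  (tweet_list.all (fun tweet => tweet.any (fun kv => kv.1 == "text"))) = true
instance (tweet_list : List (List (String × String))) : Decidable (Pre_get_word_content tweet_list) := by
  unfold Pre_get_word_content; infer_instance

def pvWitness_get_word_content : (List (List (String × String))) :=
  [[("text", "Hello, world!")], [("text", "hello\tWORLD  again")]]

def Spec_get_word_content (tweet_list : List (List (String × String))) (out : List (String × Int)) : Prop := out = get_word_content_alt tweet_list
instance (tweet_list : List (List (String × String))) (out : List (String × Int)) : Decidable (Spec_get_word_content tweet_list out) := by unfold Spec_get_word_content; infer_instance

-- ===== CLAIM (what is proved, stated in full; the proofs are below) =====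
def Claim_equal_get_word_content : Prop := ∀ (tweet_list : List (List (String × String))), Dom_get_word_content tweet_list → Pre_get_word_content tweet_list → Spec_get_word_content tweet_list (get_word_content tweet_list)

-- ===== LEMMAS AND PROOFS =====

-- the word list a tweet contributes, in A's formulation (on the char-list side)
def pvWordsOf (tweet : List (String × String)) : List String :=
  PySem.Str.split₀ (String.ofList
    (((((PySem.Dict.mk tweet).get? "text").getD "").toList.map PySem.Chars.lowerChar).filter
      (fun c => !(PySem.Set.contains pvExclude c))))

theorem pv_go_cons (c : Char) (rest cur : List Char) (acc : List (List Char)) :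
    PySem.Chars.split₀.go (c :: rest) cur acc =
      (if PySem.Chars.isspace c then
        (if cur.isEmpty then PySem.Chars.split₀.go rest [] acc
         else PySem.Chars.split₀.go rest [] (cur.reverse :: acc))
       else PySem.Chars.split₀.go rest (c :: cur) acc) := by
  rw [PySem.Chars.split₀.go]

theorem pv_go_nil (cur : List Char) (acc : List (List Char)) :
    PySem.Chars.split₀.go [] cur acc =
      (if cur.isEmpty then acc.reverse else (cur.reverse :: acc).reverse) := by
  rw [PySem.Chars.split₀.go]

theorem pv_go_acc (cs : List Char) : ∀ (cur : List Char) (acc : List (List Char)),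
    PySem.Chars.split₀.go cs cur acc = acc.reverse ++ PySem.Chars.split₀.go cs cur [] := by
  induction cs with
  | nil => intro cur acc; simp only [pv_go_nil]; split_ifs <;> simp
  | cons c rest ih =>
    intro cur acc
    simp only [pv_go_cons]
    split_ifs with h1 h2
    · exact ih [] acc
    · rw [ih [] (cur.reverse :: acc), ih [] [cur.reverse]]; simp
    · exact ih (c :: cur) acc

-- the tokenizer loop over already lowered, punctuation-free characters computes
-- one pvBump per word of Python's str.split()
theorem pv_tok (cs : List Char) : ∀ (d : PySem.Dict String Int) (cur : List Char),
    pvFlush (cs.foldl pvStep (d, cur)) =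
      (PySem.Chars.split₀.go cs cur.reverse []).foldl (fun d w => pvBump d (String.ofList w)) d := by
  induction cs with
  | nil =>
    intro d cur
    simp only [List.foldl_nil, pv_go_nil, pvFlush]
    rcases cur with _ | ⟨c, cur'⟩ <;> simp
  | cons c rest ih =>
    intro d cur
    simp only [List.foldl_cons, pv_go_cons, pvStep]
    rcases cur with _ | ⟨c', cur'⟩
    · by_cases h : PySem.Chars.isspace c = true
      · simpa [h] using ih d []
      · simpa [h] using ih d [c]
    · by_cases h : PySem.Chars.isspace c = true
      · have h1 := ih (pvBump d (String.ofList (c' :: cur'))) []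
        have h2 := pv_go_acc rest [] [c' :: cur']
        simp only [List.reverse_nil] at h1
        simp [h, h1, h2]
      · simpa [h] using ih d ((c' :: cur') ++ [c])

-- B's inner loop (lower each char, skip punctuation inline) is the tokenizer loop
-- over the lowered-and-filtered character list
theorem pv_inner (cs : List Char) : ∀ (st : PySem.Dict String Int × List Char),
    cs.foldl (fun st ch0 =>
        let ch := PySem.Chars.lowerChar ch0
        if PySem.Set.contains pvExclude ch then st else pvStep st ch) st =
      ((cs.map PySem.Chars.lowerChar).filter
        (fun c => !(PySem.Set.contains pvExclude c))).foldl pvStep st := by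
  induction cs with
  | nil => intro st; rfl
  | cons c rest ih =>
    intro st
    simp only [List.foldl_cons, List.map_cons, List.filter_cons]
    by_cases h : PySem.Set.contains pvExclude (PySem.Chars.lowerChar c) = true
    · simp only [h, Bool.not_true, Bool.false_eq_true, if_false, if_true]
      exact ih st
    · simp only [Bool.not_eq_true] at h
      simp only [h, Bool.not_false, Bool.false_eq_true, if_false, reduceIte]
      exact ih (pvStep st (PySem.Chars.lowerChar c))

-- convert a fold over the char-list words into a fold over the String words
theorem pv_foldl_words (s : String) (d : PySem.Dict String Int) :
    (PySem.Chars.split₀ s.toList).foldl (fun d w => pvBump d (String.ofList w)) d =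
      (PySem.Str.split₀ s).foldl pvBump d := by
  rw [← PySem.Str.split₀_map_toList, List.foldl_map]
  simp

-- one whole tweet on B's side contributes exactly a fold of pvBump over pvWordsOf
theorem pv_tweet (tweet : List (String × String)) (d : PySem.Dict String Int) :
    pvFlush ((((PySem.Dict.mk tweet).get? "text").getD "").toList.foldl
      (fun st ch0 =>
        let ch := PySem.Chars.lowerChar ch0
        if PySem.Set.contains pvExclude ch then st else pvStep st ch)
      (d, ([] : List Char))) = (pvWordsOf tweet).foldl pvBump d := by
  rw [pv_inner, pv_tok]
  simp only [List.reverse_nil]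
  rw [pvWordsOf, ← pv_foldl_words]
  congr 1
  simp [PySem.Chars.split₀]

-- B's outer loop is a single pvBump-fold over the concatenation of all words
theorem pv_b_top (tl : List (List (String × String))) : ∀ (d : PySem.Dict String Int),
    tl.foldl (fun counts tweet =>
      pvFlush ((((PySem.Dict.mk tweet).get? "text").getD "").toList.foldl
        (fun st ch0 =>
          let ch := PySem.Chars.lowerChar ch0
          if PySem.Set.contains pvExclude ch then st else pvStep st ch)
        (counts, ([] : List Char)))) d = (tl.flatMap pvWordsOf).foldl pvBump d := by
  induction tl with
  | nil => intro d; rfl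
  | cons t rest ih =>
    intro d
    simp only [List.foldl_cons, List.flatMap_cons, List.foldl_append]
    rw [pv_tweet t d]
    exact ih _

-- A's append-one-by-one inner loop and its outer loop build the same concatenation
theorem pv_a_words (tl : List (List (String × String))) : ∀ (acc : List String),
    tl.foldl (fun all_words tweet =>
      let tweet_text := PySem.Str.lower (((PySem.Dict.mk tweet).get? "text").getD "")
      let chars := tweet_text.toList.filter (fun c => !(PySem.Set.contains pvExclude c))
      let tweet_text2 := String.ofList chars
      (PySem.Str.split₀ tweet_text2).foldl (fun a w => a ++ [w]) all_words) acc =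
    acc ++ tl.flatMap pvWordsOf := by
  induction tl with
  | nil => intro acc; simp
  | cons t rest ih =>
    intro acc
    simp only [List.foldl_cons, List.flatMap_cons]
    rw [ih, PySem.List.foldl_append_eq_flatMap]
    simp [pvWordsOf, PySem.Str.toList_lower, PySem.Chars.lower, List.flatMap_singleton']

theorem pv_main (tl : List (List (String × String))) :
    get_word_content tl = get_word_content_alt tl := by
  simp only [get_word_content, get_word_content_alt]
  rw [pv_a_words tl [], pv_b_top tl PySem.Dict.empty]
  rw [← PySem.Dict.foldl_insert_getD_add_one_eq_counter]
  rfl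

-- ===== VERDICT (by name: the statement is the Claim_ definition above) =====
theorem get_word_content_spec : Claim_equal_get_word_content := by
  intro tl _ _
  unfold Spec_get_word_content
  exact pv_main tl
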